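-- pv_equiv track=rewrite | github.com/Livia-ferrao/INE5421-Linguagens_Formais | Trabalho2/ER->AFD.py | valid_operations
-- ===== SOURCE A (Python) =====
-- def valid_operations(regex):
--     for i, c in enumerate(regex):
--         if c == '*':
--             if i == 0:
--                 return False
--             if regex[i - 1] in '(|':
--                 return False
--         if c == '|':
--             if i == 0 or i == len(regex) - 1:
--                 return False
--             if regex[i - 1] in '(|':
--                 return False
--             if regex[i + 1] in ')|':
--                 return False
--     return True
-- ===== SOURCE B (Python) =====
-- def valid_operations(regex):
--     if regex.startswith('*') or regex.startswith('|') or regex.endswith('|'):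
--         return False
--     return all(p not in regex for p in ('(*', '|*', '(|', '||', '|)'))
-- ===== Notes on version B (the rewrite author's own statement) =====
-- stated objective: simpler
-- what changed: Replaces A's indexed per-character scan with boundary arithmetic by two boundary checks (startswith/endswith) plus one substring-membership test for each of the five forbidden adjacent operator combinations, so all index bookkeeping disappears.
import Mathlib
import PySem

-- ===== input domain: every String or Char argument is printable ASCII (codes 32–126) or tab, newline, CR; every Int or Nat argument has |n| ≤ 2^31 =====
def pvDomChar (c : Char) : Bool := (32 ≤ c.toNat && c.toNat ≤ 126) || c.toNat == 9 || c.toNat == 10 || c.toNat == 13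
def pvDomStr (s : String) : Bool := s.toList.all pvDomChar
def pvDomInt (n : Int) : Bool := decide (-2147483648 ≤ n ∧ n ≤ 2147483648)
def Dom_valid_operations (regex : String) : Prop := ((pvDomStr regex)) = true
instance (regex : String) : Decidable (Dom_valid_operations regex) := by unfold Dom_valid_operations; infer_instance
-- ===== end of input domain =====

-- B replaces A's indexed scan with boundary checks (startswith/endswith) plus a
-- substring search for each of the five forbidden two-character combinations (objective: simpler).

-- ===== PORT A =====
-- A's loop: index i plus remaining characters; regex[i-1] / regex[i+1] are in range whenever the Python reaches them
def loopA (l : List Char) : Nat → List Char → Bool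
  | _, [] => true
  | i, c :: rest =>
    if c = '*' ∧ i = 0 then false
    else if c = '*' ∧ (l.getD (i-1) ' ' = '(' ∨ l.getD (i-1) ' ' = '|') then false
    else if c = '|' ∧ (i = 0 ∨ i = l.length - 1) then false
    else if c = '|' ∧ (l.getD (i-1) ' ' = '(' ∨ l.getD (i-1) ' ' = '|') then false
    else if c = '|' ∧ (l.getD (i+1) ' ' = ')' ∨ l.getD (i+1) ' ' = '|') then false
    else loopA l (i+1) rest

def valid_operations (regex : String) : Bool :=
  loopA regex.toList 0 regex.toList

-- ===== PORT B =====
def forbiddenBigrams : List String := ["(*", "|*", "(|", "||", "|)"]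

def valid_operations_alt (regex : String) : Bool :=
  if PySem.Str.startswith regex "*" || PySem.Str.startswith regex "|" || PySem.Str.endswith regex "|" then
    false
  else
    forbiddenBigrams.all (fun p => ! PySem.Str.isIn p regex)

-- ===== PRECONDITION & SPEC =====
def Spec_valid_operations (regex : String) (out : Bool) : Prop := out = valid_operations_alt regex
instance (regex : String) (out : Bool) : Decidable (Spec_valid_operations regex out) := by unfold Spec_valid_operations; infer_instance

-- ===== CLAIM (what is proved, stated in full; the proofs are below) =====
def Claim_equal_valid_operations : Prop := ∀ (regex : String), Dom_valid_operations regex → Spec_valid_operations regex (valid_operations regex)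

-- ===== LEMMAS AND PROOFS =====

def forbiddenPairs : List (Char × Char) := [('(','*'), ('|','*'), ('(','|'), ('|','|'), ('|',')')]

-- scan over the sentinel-padded list, threading the previous character
def gScan (prev : Char) : List Char → Bool
  | [] => forbiddenPairs.contains (prev, ')')
  | c :: rest => forbiddenPairs.contains (prev, c) || gScan c rest

-- invariant: A's loop from index i equals (negated) gScan with the previous character;
-- a previous '|' can only be entered with its neighbour checks already passed
theorem loopA_eq_gScan (rest : List Char) : ∀ (l : List Char) (i : Nat),
    l.drop i = rest →
    ((if i = 0 then '(' else l.getD (i-1) ' ') = '|' →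
      i < l.length ∧ l.getD i ' ' ≠ ')' ∧ l.getD i ' ' ≠ '|') →
    loopA l i rest = ! gScan (if i = 0 then '(' else l.getD (i-1) ' ') rest := by
  induction rest with
  | nil =>
    intro l i hdrop hprev
    have hlen : l.length ≤ i := by
      have h := congrArg List.length hdrop; simp at h; omega
    obtain ⟨prev, hp⟩ : ∃ p, (if i = 0 then '(' else l.getD (i-1) ' ') = p := ⟨_, rfl⟩
    rw [hp] at hprev ⊢
    have hne : prev ≠ '|' := fun h => absurd (hprev h).1 (by omega)
    simp [loopA, gScan, forbiddenPairs, Prod.ext_iff, hne]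
  | cons c rest ih =>
    intro l i hdrop hprev
    have hlenlt : i < l.length := by
      have h := congrArg List.length hdrop; simp at h; omega
    have hlen : l.length = i + 1 + rest.length := by
      have h := congrArg List.length hdrop; simp at h; omega
    have h0 : l[i]? = some c := by
      have h1 : (l.drop i)[0]? = some c := by simp [hdrop]
      simpa [List.getElem?_drop] using h1
    have hgi : l.getD i ' ' = c := by simp [List.getD_eq_getElem?_getD, h0]
    have hdrop1 : l.drop (i+1) = rest := by
      have h1 : l.drop (i+1) = (l.drop i).drop 1 := by rw [List.drop_drop]
      rw [h1, hdrop]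
      rfl
    obtain ⟨prev, hp⟩ : ∃ p, (if i = 0 then '(' else l.getD (i-1) ' ') = p := ⟨_, rfl⟩
    rw [hp] at hprev ⊢
    have hprev0 : i = 0 → prev = '(' := by intro h; rw [← hp, if_pos h]
    have hprevD : i ≠ 0 → l.getD (i-1) ' ' = prev := by intro h; rw [← hp, if_neg h]
    have hcont : forbiddenPairs.contains (prev, c) = true ↔
        (((c = '*' ∨ c = '|') ∧ (prev = '(' ∨ prev = '|')) ∨ (prev = '|' ∧ c = ')')) := by
      simp [forbiddenPairs, Prod.ext_iff]
      tauto
    simp only [loopA, gScan]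
    by_cases hct : forbiddenPairs.contains (prev, c) = true
    · rw [hct]
      simp only [Bool.true_or, Bool.not_true]
      split_ifs with h1 h2 h3 h4 h5
      · rfl
      · rfl
      · rfl
      · rfl
      · rfl
      · exfalso
        rcases hcont.mp hct with ⟨hc, hpv⟩ | ⟨hpv, hc⟩
        · rcases hc with hc | hc <;> subst hc
          · by_cases hz : i = 0
            · exact h1 ⟨rfl, hz⟩
            · exact h2 ⟨rfl, by rw [hprevD hz]; exact hpv⟩
          · by_cases hz : i = 0
            · exact h3 ⟨rfl, Or.inl hz⟩
            · exact h4 ⟨rfl, by rw [hprevD hz]; exact hpv⟩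
        · have h := hprev hpv
          rw [hgi] at h
          exact h.2.1 hc
    · have hcf : forbiddenPairs.contains (prev, c) = false := Bool.eq_false_iff.mpr hct
      have hnc : ¬(((c = '*' ∨ c = '|') ∧ (prev = '(' ∨ prev = '|')) ∨ (prev = '|' ∧ c = ')')) :=
        fun hX => hct (hcont.mpr hX)
      rw [hcf]
      simp only [Bool.false_or]
      split_ifs with h1 h2 h3 h4 h5
      · exact absurd (Or.inl ⟨Or.inl h1.1, Or.inl (hprev0 h1.2)⟩) hnc
      · refine absurd (Or.inl ⟨Or.inl h2.1, ?_⟩) hnc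
        by_cases hz : i = 0
        · exact Or.inl (hprev0 hz)
        · rw [← hprevD hz]; exact h2.2
      · rcases h3.2 with hz | hz
        · exact absurd (Or.inl ⟨Or.inr h3.1, Or.inl (hprev0 hz)⟩) hnc
        · have hrest : rest = [] := by
            have : rest.length = 0 := by omega
            exact List.eq_nil_of_length_eq_zero this
          subst hrest
          rw [h3.1]
          simp [gScan, forbiddenPairs]
      · refine absurd (Or.inl ⟨Or.inr h4.1, ?_⟩) hnc
        by_cases hz : i = 0
        · exact Or.inl (hprev0 hz)
        · rw [← hprevD hz]; exact h4.2
      · cases rest with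
        | nil =>
          exfalso
          have hnone : l[i+1]? = none := List.getElem?_eq_none (by simp at hlen; omega)
          have hsp : l.getD (i+1) ' ' = ' ' := by simp [List.getD_eq_getElem?_getD, hnone]
          rw [hsp] at h5
          rcases h5.2 with h | h <;> exact absurd h (by decide)
        | cons x rest' =>
          have hx : l[i+1]? = some x := by
            have h1 : (l.drop (i+1))[0]? = some x := by simp [hdrop1]
            simpa [List.getElem?_drop] using h1
          have hxD : l.getD (i+1) ' ' = x := by simp [List.getD_eq_getElem?_getD, hx]
          rw [hxD] at h5
          rw [h5.1]
          simp only [gScan]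
          have hcx : forbiddenPairs.contains ('|', x) = true := by
            rcases h5.2 with h | h <;> subst h <;> decide
          rw [hcx]
          rfl
      · have hif : (if i + 1 = 0 then '(' else l.getD (i+1-1) ' ') = c := by
          rw [if_neg (by omega)]; simpa using hgi
        rw [← hif]
        apply ih l (i+1) hdrop1
        intro hpnew
        rw [hif] at hpnew
        refine ⟨?_, ?_, ?_⟩
        · have hne : ¬ (i = 0 ∨ i = l.length - 1) := fun hh => h3 ⟨hpnew, hh⟩
          omega
        · exact fun heq => h5 ⟨hpnew, Or.inl heq⟩
        · exact fun heq => h5 ⟨hpnew, Or.inr heq⟩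

-- a forbidden pair found by gScan is a forbidden bigram of the padded list, and conversely
theorem gScan_iff_infix (l : List Char) : ∀ (prev : Char),
    gScan prev l = true ↔ ∃ p ∈ forbiddenPairs, [p.1, p.2] <:+: (prev :: l ++ [')']) := by
  induction l with
  | nil =>
    intro prev
    simp only [gScan]
    constructor
    · intro h
      exact ⟨(prev, ')'), by simpa [List.contains_iff_mem] using h, List.infix_refl _⟩
    · rintro ⟨⟨a, b⟩, hmem, hinf⟩
      have h2 : [a, b] = [prev, ')'] := hinf.eq_of_length (by simp)
      simp at h2
      rw [List.contains_iff_mem]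
      simpa [h2.1, h2.2] using hmem
  | cons c rest ih =>
    intro prev
    simp only [gScan, Bool.or_eq_true, ih]
    constructor
    · rintro (h | ⟨p, hmem, hinf⟩)
      · exact ⟨(prev, c), by simpa [List.contains_iff_mem] using h,
          ⟨[], rest ++ [')'], by simp⟩⟩
      · obtain ⟨s, t, hst⟩ := hinf
        exact ⟨p, hmem, ⟨prev :: s, t, by simpa using congrArg (fun z => prev :: z) hst⟩⟩
    · rintro ⟨⟨a, b⟩, hmem, hinf⟩
      rw [List.cons_append, List.infix_cons_iff] at hinf
      rcases hinf with hpre | hinf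
      · rcases List.cons_prefix_cons.mp hpre with ⟨ha, hpre2⟩
        rcases List.cons_prefix_cons.mp hpre2 with ⟨hb, _⟩
        left
        rw [List.contains_iff_mem]
        subst ha hb
        exact hmem
      · exact Or.inr ⟨(a, b), hmem, hinf⟩

-- a bigram of l ++ [c0] is a bigram of l, or ends at the appended sentinel
theorem infix_pair_append_singleton (a b c0 : Char) (l : List Char) :
    [a, b] <:+: (l ++ [c0]) ↔ [a, b] <:+: l ∨ (b = c0 ∧ [a] <:+ l) := by
  induction l with
  | nil =>
    simp only [List.nil_append]
    constructor
    · intro h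
      exact absurd (List.IsInfix.length_le h) (by simp)
    · rintro (h | ⟨_, h⟩)
      · exact absurd (List.IsInfix.length_le h) (by simp)
      · exact absurd (List.IsSuffix.length_le h) (by simp)
  | cons x xs ih =>
    rw [List.cons_append, List.infix_cons_iff, List.infix_cons_iff, ih]
    constructor
    · rintro (hpre | h | h)
      · rcases List.cons_prefix_cons.mp hpre with ⟨ha, hpre2⟩
        cases xs with
        | nil =>
          rcases List.cons_prefix_cons.mp hpre2 with ⟨hb, _⟩
          exact Or.inr ⟨hb, by simp [ha]⟩
        | cons y ys =>
          rcases List.cons_prefix_cons.mp hpre2 with ⟨hb, _⟩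
          refine Or.inl (Or.inl ?_)
          subst ha hb
          exact List.cons_prefix_cons.mpr ⟨rfl, List.cons_prefix_cons.mpr ⟨rfl, List.nil_prefix⟩⟩
      · exact Or.inl (Or.inr h)
      · exact Or.inr ⟨h.1, h.2.trans (List.suffix_cons _ _)⟩
    · rintro ((hpre | h) | ⟨hb, hsuf⟩)
      · exact Or.inl (hpre.trans (List.prefix_append _ _))
      · exact Or.inr (Or.inl h)
      · rcases List.suffix_cons_iff.mp hsuf with heq | hsuf2
        · simp at heq
          left
          exact List.cons_prefix_cons.mpr ⟨heq.1, by simp [hb, heq.2]⟩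
        · exact Or.inr (Or.inr ⟨hb, hsuf2⟩)

theorem head_append_singleton (b c0 : Char) (l : List Char) (hb : b ≠ c0) :
    (l ++ [c0]).head? = some b ↔ l.head? = some b := by
  cases l with
  | nil => simp [Ne.symm hb]
  | cons x xs => simp

theorem prefix_singleton_iff_head (a : Char) (l : List Char) :
    [a] <+: l ↔ l.head? = some a := by
  cases l with
  | nil => simp
  | cons x xs => simp [List.cons_prefix_cons, eq_comm]

-- bigram of l is a bigram of the padded list
theorem infix_pad_of_infix (a b : Char) (l : List Char) (h : [a, b] <:+: l) :
    [a, b] <:+: ('(' :: l ++ [')']) := by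
  obtain ⟨s, t, hst⟩ := h
  exact ⟨'(' :: s, t ++ [')'], by rw [← hst]; simp⟩

-- from a sentinel prefix pair ('(', b): b heads l (b ≠ ')')
theorem head_of_pad_prefix (b : Char) (l : List Char) (hb : b ≠ ')')
    (hpre : ['(', b] <+: '(' :: (l ++ [')'])) : [b] <+: l := by
  rcases List.cons_prefix_cons.mp hpre with ⟨_, hpre2⟩
  rw [prefix_singleton_iff_head] at hpre2
  rw [head_append_singleton _ _ _ hb] at hpre2
  exact (prefix_singleton_iff_head _ _).mpr hpre2

-- the padded-scan characterisation, rewritten as B's boundary + bigram conditions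
theorem gScan_paren_iff (l : List Char) :
    gScan '(' l = true ↔
      (['*'] <+: l ∨ ['|'] <+: l ∨ ['|'] <:+ l) ∨
      (['(','*'] <:+: l ∨ ['|','*'] <:+: l ∨ ['(','|'] <:+: l ∨ ['|','|'] <:+: l ∨ ['|',')'] <:+: l) := by
  rw [gScan_iff_infix]
  constructor
  · rintro ⟨⟨a, b⟩, hmem, hinf⟩
    rw [List.cons_append, List.infix_cons_iff] at hinf
    fin_cases hmem <;> rcases hinf with hpre | hinf
    · exact Or.inl (Or.inl (head_of_pad_prefix _ _ (by decide) hpre))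
    · rcases (infix_pair_append_singleton _ _ _ _).mp hinf with h | ⟨hb, _⟩
      · exact Or.inr (Or.inl h)
      · exact absurd hb (by decide)
    · exact absurd (List.cons_prefix_cons.mp hpre).1 (by decide)
    · rcases (infix_pair_append_singleton _ _ _ _).mp hinf with h | ⟨hb, _⟩
      · exact Or.inr (Or.inr (Or.inl h))
      · exact absurd hb (by decide)
    · exact Or.inl (Or.inr (Or.inl (head_of_pad_prefix _ _ (by decide) hpre)))
    · rcases (infix_pair_append_singleton _ _ _ _).mp hinf with h | ⟨hb, _⟩
      · exact Or.inr (Or.inr (Or.inr (Or.inl h)))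
      · exact absurd hb (by decide)
    · exact absurd (List.cons_prefix_cons.mp hpre).1 (by decide)
    · rcases (infix_pair_append_singleton _ _ _ _).mp hinf with h | ⟨hb, _⟩
      · exact Or.inr (Or.inr (Or.inr (Or.inr (Or.inl h))))
      · exact absurd hb (by decide)
    · exact absurd (List.cons_prefix_cons.mp hpre).1 (by decide)
    · rcases (infix_pair_append_singleton _ _ _ _).mp hinf with h | ⟨_, hsuf⟩
      · exact Or.inr (Or.inr (Or.inr (Or.inr (Or.inr h))))
      · exact Or.inl (Or.inr (Or.inr hsuf))
  · rintro ((h | h | h) | h | h | h | h | h)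
    · obtain ⟨t, ht⟩ := h
      exact ⟨('(', '*'), by decide, ⟨[], t ++ [')'], by rw [← ht]; simp⟩⟩
    · obtain ⟨t, ht⟩ := h
      exact ⟨('(', '|'), by decide, ⟨[], t ++ [')'], by rw [← ht]; simp⟩⟩
    · obtain ⟨t, ht⟩ := h
      exact ⟨('|', ')'), by decide, ⟨'(' :: t, [], by rw [← ht]; simp⟩⟩

    · exact ⟨('(', '*'), by decide, infix_pad_of_infix _ _ _ h⟩
    · exact ⟨('|', '*'), by decide, infix_pad_of_infix _ _ _ h⟩
    · exact ⟨('(', '|'), by decide, infix_pad_of_infix _ _ _ h⟩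
    · exact ⟨('|', '|'), by decide, infix_pad_of_infix _ _ _ h⟩
    · exact ⟨('|', ')'), by decide, infix_pad_of_infix _ _ _ h⟩

theorem alt_iff (regex : String) :
    valid_operations_alt regex = true ↔
      ¬ ((['*'] <+: regex.toList ∨ ['|'] <+: regex.toList ∨ ['|'] <:+ regex.toList) ∨
        (['(','*'] <:+: regex.toList ∨ ['|','*'] <:+: regex.toList ∨ ['(','|'] <:+: regex.toList ∨
         ['|','|'] <:+: regex.toList ∨ ['|',')'] <:+: regex.toList)) := by
  unfold valid_operations_alt forbiddenBigrams
  by_cases hs : PySem.Str.startswith regex "*" || PySem.Str.startswith regex "|" || PySem.Str.endswith regex "|"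
  · rw [if_pos hs]
    simp only [Bool.or_eq_true, PySem.Str.startswith_eq, PySem.Str.endswith_eq,
      PySem.Chars.startswith_iff, PySem.Chars.endswith_iff] at hs
    simp only [Bool.false_eq_true, false_iff, not_not]
    rcases hs with (h | h) | h
    · exact Or.inl (Or.inl (by simpa using h))
    · exact Or.inl (Or.inr (Or.inl (by simpa using h)))
    · exact Or.inl (Or.inr (Or.inr (by simpa using h)))
  · rw [if_neg hs]
    simp only [Bool.or_eq_true, PySem.Str.startswith_eq, PySem.Str.endswith_eq,
      PySem.Chars.startswith_iff, PySem.Chars.endswith_iff, not_or] at hs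
    simp only [List.all_cons, List.all_nil, Bool.and_eq_true, Bool.not_eq_true',
      PySem.Str.isIn_eq, PySem.Chars.isIn_eq_false_iff, Bool.and_true]
    constructor
    · rintro ⟨h1, h2, h3, h4, h5⟩
      rintro (hb | hb)
      · rcases hb with hb | hb | hb
        · exact hs.1.1 (by simpa using hb)
        · exact hs.1.2 (by simpa using hb)
        · exact hs.2 (by simpa using hb)
      · rcases hb with hb | hb | hb | hb
        · exact h1 (by simpa using hb)
        · exact h2 (by simpa using hb)
        · exact h3 (by simpa using hb)
        · rcases hb with hb | hb
          · exact h4 (by simpa using hb)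
          · exact h5 (by simpa using hb)
    · intro h
      refine ⟨?_, ?_, ?_, ?_, ?_⟩ <;> intro hb <;>
        exact h (Or.inr (by simp at hb; tauto))

-- ===== VERDICT (by name: the statement is the Claim_ definition above) =====
theorem valid_operations_spec : Claim_equal_valid_operations := by
  intro regex _
  show valid_operations regex = valid_operations_alt regex
  have ha : valid_operations regex = ! gScan '(' regex.toList := by
    unfold valid_operations
    rw [loopA_eq_gScan regex.toList regex.toList 0 rfl
      (by intro h; rw [if_pos rfl] at h; exact absurd h (by decide))]
    rw [if_pos rfl]
  rw [ha, Bool.eq_iff_iff]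
  rw [alt_iff, Bool.not_eq_true', Bool.eq_false_iff, Ne, gScan_paren_iff]
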